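-- pv_equiv track=rewrite | github.com/Coslate/CMU_16820_Advanced_Computer_Vision | HW4_my_work/python/run_q4.py | cluster_bounding_boxes
-- ===== SOURCE A (Python) =====
-- def cluster_bounding_boxes(bboxes, vertical_threshold=10):
--     # Sort bounding boxes by their minr (top row) values
--     bboxes_sorted = sorted(bboxes, key=lambda x: x[0])
--
--     lines = []  # List to hold lists of boxes for each line
--     current_line = [bboxes_sorted[0]]  # Start with the first bounding box in the first line
--
--     for i in range(1, len(bboxes_sorted)):
--         minr, minc, maxr, maxc = bboxes_sorted[i]
--         prev_minr, prev_minc, prev_maxr, prev_maxc = current_line[-1]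
--
--         # Check if the current box is within the vertical threshold of the previous box
--         if abs(minr - prev_minr) <= vertical_threshold:
--             current_line.append(bboxes_sorted[i])
--         else:
--             # Start a new line
--             lines.append(current_line)
--             current_line = [bboxes_sorted[i]]
--
--     # Append the last line
--     lines.append(current_line)
--
--     return lines
-- ===== SOURCE B (Python) =====
-- def cluster_bounding_boxes(bboxes, vertical_threshold=10):
--     # Two staged passes over the stable x[0]-sort: first materialise the list
--     # of cut indices (positions where adjacent top rows differ by more than the
--     # threshold), then slice the sorted list between consecutive boundaries.
--     s = sorted(bboxes, key=lambda x: x[0])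
--     cuts = [i for i, (p, q) in enumerate(zip(s, s[1:]), 1)
--             if q[0] - p[0] > vertical_threshold]
--     bounds = [0] + cuts + [len(s)]
--     return [s[a:b] for a, b in zip(bounds, bounds[1:])]
-- ===== Notes on version B (the rewrite author's own statement) =====
-- stated objective: alternative
-- what changed: Replaces A's single online pass with a mutable current_line accumulator that is flushed at each gap by two staged offline passes: first a comprehension over enumerate(zip(s, s[1:])) materialises the list of cut indices, then the result is produced by slicing the sorted list between consecutive boundaries [0]+cuts+[len(s)]; no per-element grouping state exists.
import Mathlib
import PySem

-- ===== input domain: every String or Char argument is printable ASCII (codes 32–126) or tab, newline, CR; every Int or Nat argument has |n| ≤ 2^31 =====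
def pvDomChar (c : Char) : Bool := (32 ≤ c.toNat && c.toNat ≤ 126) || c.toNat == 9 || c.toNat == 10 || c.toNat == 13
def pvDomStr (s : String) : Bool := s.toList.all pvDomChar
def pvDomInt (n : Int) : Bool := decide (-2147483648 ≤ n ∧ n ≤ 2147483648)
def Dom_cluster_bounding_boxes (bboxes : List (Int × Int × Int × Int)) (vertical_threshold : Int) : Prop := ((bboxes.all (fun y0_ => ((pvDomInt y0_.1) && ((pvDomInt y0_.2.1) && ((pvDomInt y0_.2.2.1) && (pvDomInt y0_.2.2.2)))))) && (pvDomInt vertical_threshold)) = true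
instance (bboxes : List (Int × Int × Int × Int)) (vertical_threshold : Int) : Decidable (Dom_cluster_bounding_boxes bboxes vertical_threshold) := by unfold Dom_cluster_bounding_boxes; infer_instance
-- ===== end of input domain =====

-- B replaces A's online pass with its flushed current_line accumulator by two staged
-- offline passes: a comprehension collecting the cut indices, then slicing the sorted
-- list between consecutive boundaries; objective: alternative decomposition, same cost.

-- ===== PORT A =====
-- the forward loop of A: state (lines, current_line); current_line[-1] read with a
-- default that is never used (current_line is always nonempty)
def pvClusterLoopA (t : Int) : List (Int × Int × Int × Int) → List (List (Int × Int × Int × Int)) → List (Int × Int × Int × Int) → List (List (Int × Int × Int × Int))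
  | [], lines, cur => lines ++ [cur]
  | b :: rs, lines, cur =>
    let prev := cur.getLastD (0, 0, 0, 0)
    if |b.1 - prev.1| ≤ t then pvClusterLoopA t rs lines (cur ++ [b])
    else pvClusterLoopA t rs (lines ++ [cur]) [b]

def cluster_bounding_boxes (bboxes : List (Int × Int × Int × Int)) (vertical_threshold : Int) : List (List (Int × Int × Int × Int)) :=
  let s := PySem.List.sorted bboxes (fun x => x.1)
  match s with
  | [] => []  -- Python raises IndexError here (bboxes_sorted[0]); excluded by Pre_
  | x :: xs => pvClusterLoopA vertical_threshold xs [] [x]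

-- ===== PORT B =====
def cluster_bounding_boxes_alt (bboxes : List (Int × Int × Int × Int)) (vertical_threshold : Int) : List (List (Int × Int × Int × Int)) :=
  let s := PySem.List.sorted bboxes (fun x => x.1)
  -- cuts = [i for i, (p, q) in enumerate(zip(s, s[1:]), 1) if q[0] - p[0] > vertical_threshold]
  let cuts := ((PySem.List.enumerate (s.zip (PySem.List.slice s (some 1) none)) 1).filter
      (fun x => decide (x.2.2.1 - x.2.1.1 > vertical_threshold))).map (fun x => x.1)
  -- bounds = [0] + cuts + [len(s)]
  let bounds : List Int := 0 :: cuts ++ [(s.length : Int)]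
  -- [s[a:b] for a, b in zip(bounds, bounds[1:])]
  (bounds.zip (PySem.List.slice bounds (some 1) none)).map
    (fun ab => PySem.List.slice s (some ab.1) (some ab.2))

-- ===== PRECONDITION & SPEC =====
-- Pre_ excludes only the empty list, on which A raises IndexError (bboxes_sorted[0]).
def Pre_cluster_bounding_boxes (bboxes : List (Int × Int × Int × Int)) (vertical_threshold : Int) : Prop := bboxes ≠ []
instance (bboxes : List (Int × Int × Int × Int)) (vertical_threshold : Int) : Decidable (Pre_cluster_bounding_boxes bboxes vertical_threshold) := by unfold Pre_cluster_bounding_boxes; infer_instance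

def pvWitness_cluster_bounding_boxes : (List (Int × Int × Int × Int)) × Int := ([(0, 0, 5, 5), (20, 0, 25, 5), (22, 3, 27, 8)], 10)

def Spec_cluster_bounding_boxes (bboxes : List (Int × Int × Int × Int)) (vertical_threshold : Int) (out : List (List (Int × Int × Int × Int))) : Prop := out = cluster_bounding_boxes_alt bboxes vertical_threshold
instance (bboxes : List (Int × Int × Int × Int)) (vertical_threshold : Int) (out : List (List (Int × Int × Int × Int))) : Decidable (Spec_cluster_bounding_boxes bboxes vertical_threshold out) := by unfold Spec_cluster_bounding_boxes; infer_instance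

-- ===== CLAIM (what is proved, stated in full; the proofs are below) =====
def Claim_equal_cluster_bounding_boxes : Prop := ∀ (bboxes : List (Int × Int × Int × Int)) (vertical_threshold : Int), Dom_cluster_bounding_boxes bboxes vertical_threshold → Pre_cluster_bounding_boxes bboxes vertical_threshold → Spec_cluster_bounding_boxes bboxes vertical_threshold (cluster_bounding_boxes bboxes vertical_threshold)

-- ===== LEMMAS AND PROOFS =====

-- common normal form: the groups of rest, with z the predecessor of rest's head,
-- z prepended to the first group
def pvR (t : Int) (z : Int × Int × Int × Int) : List (Int × Int × Int × Int) → List (List (Int × Int × Int × Int))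
  | [] => [[z]]
  | b :: rs =>
    if b.1 - z.1 > t then [z] :: pvR t b rs
    else match pvR t b rs with
         | g :: gs => (z :: g) :: gs
         | [] => [[z]]

theorem pvR_ne_nil (t : Int) (z : Int × Int × Int × Int) (l : List (Int × Int × Int × Int)) : pvR t z l ≠ [] := by
  induction l generalizing z with
  | nil => simp [pvR]
  | cons b rs ih =>
    simp only [pvR]
    split
    · simp
    · cases h : pvR t b rs with
      | nil => exact absurd h (ih b)
      | cons g gs => simp

-- ---- A-side: the forward flush loop computes pvR ----
theorem pvClusterLoopA_flush (t : Int) (rs : List (Int × Int × Int × Int)) (lines : List (List (Int × Int × Int × Int))) (cur : List (Int × Int × Int × Int)) :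
    pvClusterLoopA t rs lines cur = lines ++ pvClusterLoopA t rs [] cur := by
  induction rs generalizing lines cur with
  | nil => simp [pvClusterLoopA]
  | cons b rs ih =>
    simp only [pvClusterLoopA]
    split
    · exact ih lines (cur ++ [b])
    · rw [ih (lines ++ [cur]) [b], ih ([] ++ [cur]) [b]]
      simp

theorem pvClusterLoopA_eq_pvR (t : Int) (rs : List (Int × Int × Int × Int)) (ys : List (Int × Int × Int × Int)) (z : Int × Int × Int × Int)
    (hch : List.IsChain (fun a b : Int × Int × Int × Int => a.1 ≤ b.1) (z :: rs)) :
    pvClusterLoopA t rs [] (ys ++ [z]) =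
      (match pvR t z rs with
       | g :: gs => (ys ++ g) :: gs
       | [] => []) := by
  induction rs generalizing ys z with
  | nil => simp [pvClusterLoopA, pvR]
  | cons b rs ih =>
    obtain ⟨hzb, hch'⟩ : z.1 ≤ b.1 ∧ List.IsChain (fun a b : Int × Int × Int × Int => a.1 ≤ b.1) (b :: rs) := by
      cases hch with
      | cons_cons hzb hch' => exact ⟨hzb, hch'⟩
    have hprev : (ys ++ [z]).getLastD (0, 0, 0, 0) = z := by
      simp
    have habs : |b.1 - z.1| = b.1 - z.1 := abs_of_nonneg (by omega)
    simp only [pvClusterLoopA, hprev, pvR, habs]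
    by_cases hgap : b.1 - z.1 > t
    · rw [if_neg (by omega), if_pos hgap]
      rw [pvClusterLoopA_flush]
      have := ih [] b hch'
      simp only [List.nil_append] at this
      rw [this]
      cases h : pvR t b rs with
      | nil => exact absurd h (pvR_ne_nil t b rs)
      | cons g gs => simp
    · rw [if_pos (by omega), if_neg hgap]
      have : ys ++ [z] ++ [b] = (ys ++ [z]) ++ [b] := rfl
      rw [this, ih (ys ++ [z]) b hch']
      cases h : pvR t b rs with
      | nil => exact absurd h (pvR_ne_nil t b rs)
      | cons g gs => simp

-- ---- B-side helpers: cut indices and boundary slicing ----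
def pvCutsOf (t : Int) (s : List (Int × Int × Int × Int)) : List Int :=
  ((PySem.List.enumerate (s.zip s.tail) 1).filter
      (fun x => decide (x.2.2.1 - x.2.1.1 > t))).map (fun x => x.1)

def pvOut (t : Int) (s : List (Int × Int × Int × Int)) : List (List (Int × Int × Int × Int)) :=
  let bounds : List Int := 0 :: pvCutsOf t s ++ [(s.length : Int)]
  (bounds.zip bounds.tail).map (fun ab => PySem.List.slice s (some ab.1) (some ab.2))

theorem pvAlt_eq_pvOut (bboxes : List (Int × Int × Int × Int)) (t : Int) :
    cluster_bounding_boxes_alt bboxes t = pvOut t (PySem.List.sorted bboxes (fun x => x.1)) := by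
  unfold cluster_bounding_boxes_alt pvOut pvCutsOf
  simp only [PySem.List.slice_from_one]

theorem pvEnumerate_shift {α : Type} (l : List α) (s : Int) :
    PySem.List.enumerate l (s + 1) = (PySem.List.enumerate l s).map (fun p => (p.1 + 1, p.2)) := by
  simp only [PySem.List.enumerate_eq_zipIdx_map, List.map_map]
  apply List.map_congr_left
  intro p _
  simp only [Function.comp_apply, Prod.mk.injEq]
  exact ⟨by ring, trivial⟩

theorem pvCutsOf_cons (t : Int) (z b : Int × Int × Int × Int) (rest : List (Int × Int × Int × Int)) :
    pvCutsOf t (z :: b :: rest) =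
      (if b.1 - z.1 > t then [1] else []) ++ (pvCutsOf t (b :: rest)).map (· + 1) := by
  unfold pvCutsOf
  have hz : ((z :: b :: rest).zip (z :: b :: rest).tail) = (z, b) :: ((b :: rest).zip rest) := by
    simp [List.zip]
  rw [hz]
  have h2 : (PySem.List.enumerate ((b :: rest).zip rest) 2) = (PySem.List.enumerate ((b :: rest).zip rest) (1 + 1)) := by norm_num
  show ((((1 : Int), (z, b)) :: PySem.List.enumerate ((b :: rest).zip rest) 2).filter
      (fun x => decide (x.2.2.1 - x.2.1.1 > t))).map (fun x => x.1) = _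
  rw [h2, pvEnumerate_shift, List.filter_cons]
  have hcomp : (fun x : Int × ((Int × Int × Int × Int) × (Int × Int × Int × Int)) => decide (x.2.2.1 - x.2.1.1 > t)) ∘ (fun p : Int × ((Int × Int × Int × Int) × (Int × Int × Int × Int)) => (p.1 + 1, p.2)) = (fun x => decide (x.2.2.1 - x.2.1.1 > t)) := by
    funext x; rfl
  rw [List.filter_map, hcomp]
  by_cases hgap : b.1 - z.1 > t
  · simp [hgap, Function.comp, List.map_map]
  · simp [hgap, Function.comp, List.map_map]

theorem pvCutsOf_pos (t : Int) (s : List (Int × Int × Int × Int)) (x : Int) (hx : x ∈ pvCutsOf t s) : 1 ≤ x := by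
  unfold pvCutsOf at hx
  simp only [List.mem_map, List.mem_filter, PySem.List.enumerate_eq_zipIdx_map] at hx
  obtain ⟨p, ⟨⟨q, _, hq⟩, _⟩, hfst⟩ := hx
  subst hfst
  rw [← hq]
  simp

theorem pvSlice_shift (z : Int × Int × Int × Int) (s : List (Int × Int × Int × Int)) (a b : Int) (ha : 0 ≤ a) (hb : 0 ≤ b) :
    PySem.List.slice (z :: s) (some (a + 1)) (some (b + 1)) = PySem.List.slice s (some a) (some b) := by
  rw [PySem.List.slice_toNat _ (by omega) (by omega), PySem.List.slice_toNat _ ha hb]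
  have h1 : (a + 1).toNat = a.toNat + 1 := by omega
  have h2 : (b + 1).toNat = b.toNat + 1 := by omega
  rw [h1, h2]
  simp [Nat.succ_sub_succ]

theorem pvSlice_front (z : Int × Int × Int × Int) (s : List (Int × Int × Int × Int)) (c : Int) (hc : 0 ≤ c) :
    PySem.List.slice (z :: s) (some 0) (some (c + 1)) = z :: PySem.List.slice s (some 0) (some c) := by
  rw [PySem.List.slice_toNat _ (by omega) (by omega), PySem.List.slice_toNat _ (by omega) hc]
  have h1 : (c + 1).toNat = c.toNat + 1 := by omega
  simp [h1]

-- shifting every boundary by one drops the head of the sliced list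
theorem pvZipShift (z : Int × Int × Int × Int) (s : List (Int × Int × Int × Int)) (c : Int) (w : List Int)
    (hc : 0 ≤ c) (hw : ∀ x ∈ w, 0 ≤ x) :
    (((c + 1) :: w.map (· + 1)).zip (w.map (· + 1))).map (fun ab => PySem.List.slice (z :: s) (some ab.1) (some ab.2)) =
      ((c :: w).zip w).map (fun ab => PySem.List.slice s (some ab.1) (some ab.2)) := by
  induction w generalizing c with
  | nil => rfl
  | cons d w' ih =>
    simp only [List.map_cons, List.zip_cons_cons]
    rw [pvSlice_shift z s c d hc (hw d (by simp))]
    rw [ih d (hw d (by simp)) (fun x hx => hw x (List.mem_cons_of_mem d hx))]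

-- pvOut with the let and the tail reduced away
theorem pvOut_eq (t : Int) (s : List (Int × Int × Int × Int)) :
    pvOut t s = ((0 :: pvCutsOf t s ++ [(s.length : Int)]).zip (pvCutsOf t s ++ [(s.length : Int)])).map
      (fun ab => PySem.List.slice s (some ab.1) (some ab.2)) := rfl

theorem pvOut_eq_pvR (t : Int) (z : Int × Int × Int × Int) (rs : List (Int × Int × Int × Int)) :
    pvOut t (z :: rs) = pvR t z rs := by
  induction rs generalizing z with
  | nil =>
    rw [pvOut_eq]
    unfold pvCutsOf
    simp [pvR, PySem.List.slice_toNat]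
  | cons b rest ih =>
    have hlen : (((z :: b :: rest).length : Int)) = ((b :: rest).length : Int) + 1 := by
      simp
    -- the tail boundaries of (b :: rest), a nonempty list
    cases htl : pvCutsOf t (b :: rest) ++ [((b :: rest).length : Int)] with
    | nil => exact absurd htl (by simp)
    | cons c w =>
      have hmemtl : ∀ x ∈ (c :: w), 1 ≤ x ∨ x = ((b :: rest).length : Int) := by
        intro x hx
        rw [← htl] at hx
        rcases List.mem_append.mp hx with h | h
        · exact Or.inl (pvCutsOf_pos t (b :: rest) x h)
        · exact Or.inr (List.mem_singleton.mp h)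
      have hcw : ∀ x ∈ (c :: w), 0 ≤ x := by
        intro x hx
        rcases hmemtl x hx with h | h
        · omega
        · rw [h]; positivity
      have hc : 0 ≤ c := hcw c (by simp)
      have hw : ∀ x ∈ w, 0 ≤ x := fun x hx => hcw x (List.mem_cons_of_mem c hx)
      have hmap : (pvCutsOf t (b :: rest)).map (· + 1) ++ [((z :: b :: rest).length : Int)] =
          (c + 1) :: w.map (· + 1) := by
        rw [hlen, show ([((b :: rest).length : Int) + 1] : List Int) = [((b :: rest).length : Int)].map (· + 1) from rfl,
          ← List.map_append, htl, List.map_cons]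
      have hout' : pvOut t (b :: rest) =
          PySem.List.slice (b :: rest) (some 0) (some c) ::
            ((c :: w).zip w).map (fun ab => PySem.List.slice (b :: rest) (some ab.1) (some ab.2)) := by
        rw [pvOut_eq]
        simp only [List.cons_append]
        rw [htl]
        rfl
      rw [pvOut_eq, pvCutsOf_cons]
      simp only [List.cons_append, List.append_assoc]
      by_cases hgap : b.1 - z.1 > t
      · rw [if_pos hgap]
        simp only [List.singleton_append]
        rw [hmap]
        simp only [List.zip_cons_cons, List.map_cons]
        have hshift := pvZipShift z (b :: rest) 0 (c :: w) (by omega) hcw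
        simp only [List.map_cons, List.zip_cons_cons] at hshift
        norm_num at hshift
        rw [hshift.2, hshift.1]
        have hfirst : PySem.List.slice (z :: b :: rest) (some 0) (some 1) = [z] := by
          rw [PySem.List.slice_toNat _ (by omega) (by omega)]; rfl
        rw [hfirst]
        have hR : pvR t b rest =
            PySem.List.slice (b :: rest) none (some c) ::
              ((c :: w).zip w).map (fun ab => PySem.List.slice (b :: rest) (some ab.1) (some ab.2)) := by
          rw [← ih, hout']
          simp
        rw [← hR]
        simp [pvR, hgap]
      · rw [if_neg hgap]
        simp only [List.nil_append]
        rw [hmap]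
        simp only [List.zip_cons_cons, List.map_cons]
        rw [pvZipShift z (b :: rest) c w hc hw]
        rw [pvSlice_front z (b :: rest) c hc]
        have hres := hout'
        rw [ih] at hres
        simp only [pvR, if_neg hgap]
        rw [hres]

-- ===== VERDICT (by name: the statement is the Claim_ definition above) =====
theorem cluster_bounding_boxes_spec : Claim_equal_cluster_bounding_boxes := by
  intro bboxes t _hdom hpre
  unfold Spec_cluster_bounding_boxes
  rw [pvAlt_eq_pvOut]
  cases hs : PySem.List.sorted bboxes (fun x => x.1) with
  | nil =>
    exact absurd ((PySem.List.sorted_eq_nil_iff _ _ _).mp hs) hpre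
  | cons x xs =>
    have hpw : (PySem.List.sorted bboxes (fun x : Int × Int × Int × Int => x.1) false).Pairwise
        (fun a b : Int × Int × Int × Int => a.1 ≤ b.1) := PySem.List.sorted_pairwise bboxes _
    rw [hs] at hpw
    have hch : List.IsChain (fun a b : Int × Int × Int × Int => a.1 ≤ b.1) (x :: xs) :=
      hpw.isChain
    have hA : pvClusterLoopA t xs [] [x] = pvR t x xs := by
      have := pvClusterLoopA_eq_pvR t xs [] x hch
      simp only [List.nil_append] at this
      rw [this]
      cases h : pvR t x xs with
      | nil => exact absurd h (pvR_ne_nil t x xs)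
      | cons g gs => simp
    have hAport : cluster_bounding_boxes bboxes t = pvClusterLoopA t xs [] [x] := by
      unfold cluster_bounding_boxes
      rw [hs]
    rw [hAport, hA, pvOut_eq_pvR]
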